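-- pv_equiv track=rewrite | github.com/amol-ship-it/agi-core | grammars/arc.py | mirror_objects_h
-- ===== SOURCE A (Python) =====
-- Grid = list[list[int]]
--
-- def _find_connected_components(grid: Grid) -> list[dict]:
--     """Find all connected components (objects) via 4-connectivity flood fill.
--
--     Returns list of dicts with keys: color, pixels (set of (r,c)), bbox, size.
--     Background (0) is excluded.
--     """
--     if not grid or not grid[0]:
--         return []
--     height, width = len(grid), len(grid[0])
--     visited: set[tuple[int, int]] = set()
--     components: list[dict] = []
--
--     for r in range(height):
--         for c in range(width):
--             if grid[r][c] != 0 and (r, c) not in visited: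
--                 color = grid[r][c]
--                 pixels: set[tuple[int, int]] = set()
--                 stack = [(r, c)]
--                 while stack:
--                     cr, cc = stack.pop()
--                     if (cr, cc) in visited:
--                         continue
--                     if cr < 0 or cr >= height or cc < 0 or cc >= width:
--                         continue
--                     if grid[cr][cc] != color:
--                         continue
--                     visited.add((cr, cc))
--                     pixels.add((cr, cc))
--                     stack.extend([
--                         (cr - 1, cc), (cr + 1, cc),
--                         (cr, cc - 1), (cr, cc + 1),
--                     ])
--                 rows = [p[0] for p in pixels]
--                 cols = [p[1] for p in pixels]
--                 components.append({
--                     "color": color,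
--                     "pixels": pixels,
--                     "bbox": (min(rows), min(cols), max(rows), max(cols)),
--                     "size": len(pixels),
--                 })
--     return components
--
-- def mirror_objects_h(grid: Grid) -> Grid:
--     """Mirror each connected component horizontally within its bounding box."""
--     comps = _find_connected_components(grid)
--     if not comps:
--         return [row[:] for row in grid]
--     h, w = len(grid), len(grid[0])
--     # Copy background
--     all_pixels: set[tuple[int, int]] = set()
--     for comp in comps:
--         all_pixels.update(comp["pixels"])
--     result = [[0] * w for _ in range(h)]
--     for r in range(h):
--         for c in range(w):
--             if (r, c) not in all_pixels:
--                 result[r][c] = grid[r][c]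
--     # Mirror each object within its bbox
--     for comp in comps:
--         min_r, min_c, max_r, max_c = comp["bbox"]
--         for r, c in comp["pixels"]:
--             mirrored_c = max_c - (c - min_c)
--             result[r][mirrored_c] = comp["color"]
--     return result
-- ===== SOURCE B (Python) =====
-- Grid = list[list[int]]
--
-- def _component(grid: Grid, h: int, w: int, sr: int, sc: int) -> set:
--     """Connected region of (sr,sc) by fixpoint frontier expansion (no stack)."""
--     color = grid[sr][sc]
--     comp = {(sr, sc)}
--     while True:
--         frontier = set()
--         for (r, c) in comp:
--             for (nr, nc) in ((r - 1, c), (r + 1, c), (r, c - 1), (r, c + 1)):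
--                 if 0 <= nr < h and 0 <= nc < w and (nr, nc) not in comp \
--                         and grid[nr][nc] == color:
--                     frontier.add((nr, nc))
--         if not frontier:
--             return comp
--         comp |= frontier
--
-- def mirror_objects_h(grid: Grid) -> Grid:
--     if not grid or not grid[0]:
--         return [row[:] for row in grid]
--     h, w = len(grid), len(grid[0])
--     comps = []          # (color, pixels, min_c, max_c) in scan order
--     covered = set()
--     for r in range(h):
--         for c in range(w):
--             if grid[r][c] != 0 and (r, c) not in covered:
--                 comp = _component(grid, h, w, r, c)
--                 covered |= comp
--                 cs = [p[1] for p in comp]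
--                 comps.append((grid[r][c], comp, min(cs), max(cs)))
--     result = [[0 if (r, c) in covered else grid[r][c] for c in range(w)]
--               for r in range(h)]
--     for color, comp, min_c, max_c in comps:
--         for (r, c) in comp:
--             result[r][min_c + max_c - c] = color
--     return result
-- ===== Notes on version B (the rewrite author's own statement) =====
-- stated objective: alternative
-- what changed: The per-object stack-based DFS flood fill is replaced by a frontier-saturation fixpoint (repeatedly union the whole admissible neighbour frontier into the component until it stops growing), and the result is assembled by building the background grid with a comprehension instead of A's zero-matrix plus cell-by-cell copy loops.
-- outside the precondition, e.g. on mirror_objects_h([[0, 0], [0, 0, 5]]): A returns [[0, 0], [0, 0, 5]], B returns [[0, 0], [0, 0]]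
import Mathlib
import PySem

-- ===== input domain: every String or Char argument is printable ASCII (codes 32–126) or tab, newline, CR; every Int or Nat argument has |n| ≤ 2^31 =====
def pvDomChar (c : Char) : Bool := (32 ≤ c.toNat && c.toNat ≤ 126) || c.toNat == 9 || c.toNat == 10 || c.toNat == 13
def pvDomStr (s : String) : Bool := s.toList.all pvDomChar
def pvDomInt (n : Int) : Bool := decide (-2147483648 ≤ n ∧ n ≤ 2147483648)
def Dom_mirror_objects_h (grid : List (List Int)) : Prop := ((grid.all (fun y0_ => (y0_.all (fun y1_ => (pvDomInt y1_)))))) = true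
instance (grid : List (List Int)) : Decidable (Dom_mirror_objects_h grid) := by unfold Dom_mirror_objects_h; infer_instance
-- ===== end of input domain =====

-- ===== PORT A =====
-- B replaces A's stack-based DFS flood fill by a per-seed frontier-saturation fixpoint and a
-- different result assembly (map-built background instead of write-loops); objective: alternative.
-- Shared cell-level helpers (both Pythons index grid[r][c] and enumerate the same 4 neighbours):

def pvNbrs (p : Int × Int) : List (Int × Int) :=
  [(p.1 - 1, p.2), (p.1 + 1, p.2), (p.1, p.2 - 1), (p.1, p.2 + 1)]

def pvInb (h w : Int) (p : Int × Int) : Bool :=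
  decide (0 ≤ p.1) && decide (p.1 < h) && decide (0 ≤ p.2) && decide (p.2 < w)

def pvCellAt (grid : List (List Int)) (p : Int × Int) : Int :=
  PySem.List.pyGetD (PySem.List.pyGetD grid p.1 []) p.2 0

def pvCells (h w : Int) : List (Int × Int) :=
  (PySem.List.pyRange 0 h 1).flatMap (fun r => (PySem.List.pyRange 0 w 1).map (fun c => (r, c)))

-- cardinality bound used by the termination measures of both ports' loops
theorem pv_len_le_bound (h w : Int) (l : List (Int × Int)) (hn : l.Nodup)
    (hi : ∀ p ∈ l, pvInb h w p = true) : l.length ≤ h.toNat * w.toNat := by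
  have hsub : l.toFinset ⊆ Finset.Ico 0 h ×ˢ Finset.Ico 0 w := by
    intro p hp
    have := hi p (List.mem_toFinset.1 hp)
    simp only [pvInb, Bool.and_eq_true, decide_eq_true_eq] at this
    simp [Finset.mem_product, Finset.mem_Ico]
    omega
  calc l.length = l.toFinset.card := (List.toFinset_card_of_nodup hn).symm
    _ ≤ ((Finset.Ico 0 h) ×ˢ (Finset.Ico 0 w)).card := Finset.card_le_card hsub
    _ = h.toNat * w.toNat := by
        rw [Finset.card_product, Int.card_Ico, Int.card_Ico]; simp

theorem pv_add_length {s : PySem.Set (Int × Int)} {p : Int × Int}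
    (h : ¬ PySem.Set.contains s p = true) : (PySem.Set.add s p).length = s.length + 1 := by
  have hm : p ∉ s := fun hm => h ((PySem.Set.contains_iff s p).2 hm)
  simp [PySem.Set.add, hm]

theorem pv_dropLast_lt {α : Type} {l : List α} (h : ¬ l = []) : l.dropLast.length < l.length := by
  have : l.length ≠ 0 := by simpa using List.length_pos_of_ne_nil h |>.ne'
  simp [List.length_dropLast]; omega

-- A's inner while-loop (stack DFS), transliterated; the proof argument only feeds the
-- termination measure.
def pvFlood (grid : List (List Int)) (h w color : Int)
    (visited pixels : PySem.Set (Int × Int)) (stack : List (Int × Int))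
    (hv : visited.Nodup ∧ ∀ p ∈ visited, pvInb h w p = true) :
    { vp : PySem.Set (Int × Int) × PySem.Set (Int × Int) //
        vp.1.Nodup ∧ ∀ p ∈ vp.1, pvInb h w p = true } :=
  if hst : stack = [] then ⟨(visited, pixels), hv⟩
  else
    let p := stack.getLast hst
    let rest := stack.dropLast
    if hvis : PySem.Set.contains visited p = true then
      pvFlood grid h w color visited pixels rest hv
    else if hib : pvInb h w p = false then
      pvFlood grid h w color visited pixels rest hv
    else if hcol : ¬ pvCellAt grid p = color then
      pvFlood grid h w color visited pixels rest hv
    else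
      pvFlood grid h w color (PySem.Set.add visited p) (PySem.Set.add pixels p)
        (rest ++ pvNbrs p)
        ⟨PySem.Set.nodup_add visited p hv.1, by
          intro q hq
          rcases (PySem.Set.mem_add visited p q).1 hq with h' | rfl
          · exact hv.2 q h'
          · simpa using hib⟩
termination_by (h.toNat * w.toNat + 1 - visited.length, stack.length)
decreasing_by
  · exact Prod.Lex.right _ (pv_dropLast_lt hst)
  · exact Prod.Lex.right _ (pv_dropLast_lt hst)
  · exact Prod.Lex.right _ (pv_dropLast_lt hst)
  · apply Prod.Lex.left
    have h1 := pv_len_le_bound h w visited hv.1 hv.2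
    have h2 : (PySem.Set.add visited (stack.getLast hst)).length = visited.length + 1 :=
      pv_add_length hvis
    omega

structure PComp where
  color : Int
  pixels : List (Int × Int)
  bbox : Int × Int × Int × Int
  size : Int
deriving Repr, DecidableEq

-- the nested 'for r … for c …' scan of _find_connected_components, over the row-major cell list
def pvScanA (grid : List (List Int)) (h w : Int) (cells : List (Int × Int))
    (visited : PySem.Set (Int × Int)) (comps : List PComp)
    (hv : visited.Nodup ∧ ∀ p ∈ visited, pvInb h w p = true) : List PComp :=
  match cells with
  | [] => comps
  | p :: rest =>
    if ¬ pvCellAt grid p = 0 ∧ ¬ PySem.Set.contains visited p = true then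
      let color := pvCellAt grid p
      let vp := pvFlood grid h w color visited PySem.Set.empty [p] hv
      let pixels := vp.1.2
      let rows := pixels.map (fun q => q.1)
      let cols := pixels.map (fun q => q.2)
      pvScanA grid h w rest vp.1.1
        (comps ++ [{ color := color, pixels := pixels,
                     bbox := ((PySem.List.min? rows (fun x => x)).getD 0,
                              (PySem.List.min? cols (fun x => x)).getD 0,
                              (PySem.List.max? rows (fun x => x)).getD 0,
                              (PySem.List.max? cols (fun x => x)).getD 0),
                     size := (pixels.length : Int) }])
        vp.2
    else pvScanA grid h w rest visited comps hv

def pvFindComponents (grid : List (List Int)) : List PComp :=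
  match grid with
  | [] => []
  | r0 :: _ =>
    if r0 = [] then []
    else pvScanA grid (grid.length : Int) (r0.length : Int)
      (pvCells (grid.length : Int) (r0.length : Int)) PySem.Set.empty []
      ⟨List.nodup_nil, by intro p hp; cases hp⟩

-- result[r][c] = v  (Python's two-level indexed assignment)
def pvSet2 (m : List (List Int)) (r c : Int) (v : Int) : List (List Int) :=
  PySem.List.pySetD m r (PySem.List.pySetD (PySem.List.pyGetD m r []) c v)

def mirror_objects_h (grid : List (List Int)) : List (List Int) :=
  let comps := pvFindComponents grid
  if comps = [] then grid
  else
    let h : Int := (grid.length : Int)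
    let w : Int := ((grid.headD []).length : Int)
    let allPixels := comps.foldl (fun s c => PySem.Set.update s c.pixels) PySem.Set.empty
    let zeros := (PySem.List.pyRange 0 h 1).map
      (fun _ => (PySem.List.pyRange 0 w 1).map (fun _ => (0 : Int)))
    let bg := (PySem.List.pyRange 0 h 1).foldl (fun res r =>
        (PySem.List.pyRange 0 w 1).foldl (fun res c =>
          if ¬ PySem.Set.contains allPixels (r, c) = true then
            pvSet2 res r c (pvCellAt grid (r, c))
          else res) res) zeros
    comps.foldl (fun res comp =>
      comp.pixels.foldl (fun res q =>
        pvSet2 res q.1 (comp.bbox.2.2.2 - (q.2 - comp.bbox.2.1)) comp.color) res) bg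

-- ===== PORT B =====
-- frontier of a partial component: all admissible unexplored neighbours, one whole-set pass
def pvFrontier (grid : List (List Int)) (h w color : Int)
    (comp : PySem.Set (Int × Int)) : PySem.Set (Int × Int) :=
  comp.foldl (fun fr p =>
    (pvNbrs p).foldl (fun fr q =>
      if pvInb h w q && !(PySem.Set.contains comp q) && (pvCellAt grid q == color) then
        PySem.Set.add fr q
      else fr) fr) PySem.Set.empty

theorem pv_mem_foldl_addIf (P : (Int × Int) → Bool) (l : List (Int × Int))
    (s : PySem.Set (Int × Int)) (x : Int × Int) :
    (x ∈ l.foldl (fun fr q => if P q then PySem.Set.add fr q else fr) s) ↔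
      x ∈ s ∨ (x ∈ l ∧ P x = true) := by
  induction l generalizing s with
  | nil => simp
  | cons q l ih =>
    by_cases hq : P q = true
    · simp only [List.foldl_cons, hq, if_pos, ih, PySem.Set.mem_add]
      constructor
      · rintro ((h | rfl) | ⟨h1, h2⟩)
        · exact Or.inl h
        · exact Or.inr ⟨List.mem_cons_self, hq⟩
        · exact Or.inr ⟨List.mem_cons_of_mem _ h1, h2⟩
      · rintro (h | ⟨h1, h2⟩)
        · exact Or.inl (Or.inl h)
        · rcases List.mem_cons.1 h1 with rfl | h1
          · exact Or.inl (Or.inr rfl)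
          · exact Or.inr ⟨h1, h2⟩
    · simp only [List.foldl_cons, if_neg hq, ih]
      constructor
      · rintro (h | ⟨h1, h2⟩)
        · exact Or.inl h
        · exact Or.inr ⟨List.mem_cons_of_mem _ h1, h2⟩
      · rintro (h | ⟨h1, h2⟩)
        · exact Or.inl h
        · rcases List.mem_cons.1 h1 with rfl | h1
          · exact absurd h2 hq
          · exact Or.inr ⟨h1, h2⟩

theorem pvFrontier_mem (grid : List (List Int)) (h w color : Int)
    (comp : PySem.Set (Int × Int)) (x : Int × Int) :
    x ∈ pvFrontier grid h w color comp ↔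
      (∃ p ∈ comp, x ∈ pvNbrs p) ∧
        (pvInb h w x && !(PySem.Set.contains comp x) && (pvCellAt grid x == color)) = true := by
  unfold pvFrontier
  have main : ∀ (l : List (Int × Int)) (s : PySem.Set (Int × Int)),
      (x ∈ l.foldl (fun fr p =>
        (pvNbrs p).foldl (fun fr q =>
          if pvInb h w q && !(PySem.Set.contains comp q) && (pvCellAt grid q == color) then
            PySem.Set.add fr q
          else fr) fr) s) ↔
        x ∈ s ∨ ((∃ p ∈ l, x ∈ pvNbrs p) ∧
          (pvInb h w x && !(PySem.Set.contains comp x) && (pvCellAt grid x == color)) = true) := by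
    intro l
    induction l with
    | nil => simp
    | cons p l ih =>
      intro s
      simp only [List.foldl_cons, ih, pv_mem_foldl_addIf]
      constructor
      · rintro ((h1 | ⟨h1, h2⟩) | ⟨⟨p', hp', hx⟩, h2⟩)
        · exact Or.inl h1
        · exact Or.inr ⟨⟨p, List.mem_cons_self, h1⟩, h2⟩
        · exact Or.inr ⟨⟨p', List.mem_cons_of_mem _ hp', hx⟩, h2⟩
      · rintro (h1 | ⟨⟨p', hp', hx⟩, h2⟩)
        · exact Or.inl (Or.inl h1)
        · rcases List.mem_cons.1 hp' with rfl | hp'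
          · exact Or.inl (Or.inr ⟨hx, h2⟩)
          · exact Or.inr ⟨⟨p', hp', hx⟩, h2⟩
  simpa using main comp PySem.Set.empty

theorem pv_union_prefix {t s : PySem.Set (Int × Int)} :
    ∃ l, PySem.Set.union s t = s ++ l := by
  show ∃ l, t.foldl PySem.Set.add s = s ++ l
  induction t generalizing s with
  | nil => exact ⟨[], by simp⟩
  | cons q t ih =>
    obtain ⟨l, hl⟩ := ih (s := PySem.Set.add s q)
    by_cases hq : q ∈ s
    · exact ⟨l, by simpa [PySem.Set.add, hq] using hl⟩
    · refine ⟨q :: l, ?_⟩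
      have hstep : List.foldl PySem.Set.add s (q :: t) = List.foldl PySem.Set.add (s.add q) t := rfl
      rw [hstep, hl]
      simp [PySem.Set.add, hq]

theorem pv_union_length_lt {s t : PySem.Set (Int × Int)} {x : Int × Int}
    (hx : x ∈ t) (hxs : x ∉ s) : s.length < (PySem.Set.union s t).length := by
  obtain ⟨l, hl⟩ := pv_union_prefix (t := t) (s := s)
  have hxu : x ∈ PySem.Set.union s t := (PySem.Set.mem_union s t x).2 (Or.inr hx)
  rw [hl] at hxu ⊢
  rcases List.mem_append.1 hxu with h | h
  · exact absurd h hxs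
  · have : l ≠ [] := by rintro rfl; cases h
    have : 0 < l.length := List.length_pos_of_ne_nil this
    simp [List.length_append]; omega

-- B's _component while-loop: saturate by whole frontiers until none is found
def pvSat (grid : List (List Int)) (h w color : Int) (comp : PySem.Set (Int × Int))
    (hc : comp.Nodup ∧ ∀ p ∈ comp, pvInb h w p = true) :
    { s : PySem.Set (Int × Int) // s.Nodup ∧ ∀ p ∈ s, pvInb h w p = true } :=
  if hfr : pvFrontier grid h w color comp = [] then ⟨comp, hc⟩
  else
    let fr := pvFrontier grid h w color comp
    pvSat grid h w color (PySem.Set.union comp fr)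
      ⟨PySem.Set.nodup_union comp fr hc.1, by
        intro q hq
        rcases (PySem.Set.mem_union comp fr q).1 hq with h' | h'
        · exact hc.2 q h'
        · have := ((pvFrontier_mem grid h w color comp q).1 h').2
          simp only [Bool.and_eq_true] at this
          exact this.1.1⟩
termination_by h.toNat * w.toNat + 1 - comp.length
decreasing_by
  obtain ⟨x, hx⟩ := List.exists_mem_of_ne_nil _ hfr
  have hxc : x ∉ comp := by
    have := ((pvFrontier_mem grid h w color comp x).1 hx).2
    simp only [Bool.and_eq_true, Bool.not_eq_true'] at this
    have := this.1.2
    intro hmem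
    rw [(PySem.Set.contains_iff comp x).2 hmem] at this
    cases this
  have h1 := pv_union_length_lt hx hxc
  have h2 := pv_len_le_bound h w comp hc.1 hc.2
  omega

def pvComponentOf (grid : List (List Int)) (h w : Int) (p : Int × Int)
    (hp : pvInb h w p = true) :
    { s : PySem.Set (Int × Int) // s.Nodup ∧ ∀ q ∈ s, pvInb h w q = true } :=
  pvSat grid h w (pvCellAt grid p) [p]
    ⟨List.nodup_singleton p, by intro q hq; rcases List.mem_singleton.1 hq with rfl; exact hp⟩

theorem pvCells_inb (h w : Int) : ∀ p ∈ pvCells h w, pvInb h w p = true := by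
  intro p hp
  simp only [pvCells, List.mem_flatMap, List.mem_map] at hp
  obtain ⟨r, hr, c, hc, rfl⟩ := hp
  rw [PySem.List.mem_pyRange_one] at hr hc
  simp [pvInb]; omega

-- B's scan: same row-major sweep, but components via saturation; returns (covered, comps)
def pvScanB (grid : List (List Int)) (h w : Int) (cells : List (Int × Int))
    (covered : PySem.Set (Int × Int))
    (comps : List (Int × List (Int × Int) × Int × Int))
    (hcov : covered.Nodup ∧ ∀ p ∈ covered, pvInb h w p = true)
    (hcells : ∀ p ∈ cells, pvInb h w p = true) :
    PySem.Set (Int × Int) × List (Int × List (Int × Int) × Int × Int) :=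
  match cells with
  | [] => (covered, comps)
  | p :: rest =>
    if ¬ pvCellAt grid p = 0 ∧ ¬ PySem.Set.contains covered p = true then
      let comp := pvComponentOf grid h w p (hcells p List.mem_cons_self)
      let cs := comp.1.map (fun q => q.2)
      pvScanB grid h w rest (PySem.Set.union covered comp.1)
        (comps ++ [(pvCellAt grid p, comp.1,
          (PySem.List.min? cs (fun x => x)).getD 0,
          (PySem.List.max? cs (fun x => x)).getD 0)])
        ⟨PySem.Set.nodup_union covered comp.1 hcov.1, by
          intro q hq
          rcases (PySem.Set.mem_union covered comp.1 q).1 hq with h' | h'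
          · exact hcov.2 q h'
          · exact comp.2.2 q h'⟩
        (fun q hq => hcells q (List.mem_cons_of_mem _ hq))
    else pvScanB grid h w rest covered comps hcov
      (fun q hq => hcells q (List.mem_cons_of_mem _ hq))

def mirror_objects_h_alt (grid : List (List Int)) : List (List Int) :=
  match grid with
  | [] => []
  | r0 :: _ =>
    if r0 = [] then grid
    else
      let h : Int := (grid.length : Int)
      let w : Int := (r0.length : Int)
      let cc := pvScanB grid h w (pvCells h w) PySem.Set.empty []
        ⟨List.nodup_nil, by intro p hp; cases hp⟩ (pvCells_inb h w)
      let res0 := (PySem.List.pyRange 0 h 1).map (fun r =>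
        (PySem.List.pyRange 0 w 1).map (fun c =>
          if PySem.Set.contains cc.1 (r, c) = true then 0 else pvCellAt grid (r, c)))
      cc.2.foldl (fun res t =>
        t.2.1.foldl (fun res q =>
          pvSet2 res q.1 (t.2.2.1 + t.2.2.2 - q.2) t.1) res) res0

-- ===== PRECONDITION & SPEC =====
-- Pre_ excludes non-rectangular grids: rows shorter than the first row make A raise IndexError,
-- and rows longer than the first row on an otherwise object-free grid are a defensible-corner
-- artefact (A copies them verbatim only because of its early return; B consistently works at the
-- first row's width).  Grids with a zero-width first row, and ragged-but-longer grids containing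
-- an object, are inside Pre_ (A and B agree there).
def Pre_mirror_objects_h (grid : List (List Int)) : Prop :=
  (∀ row ∈ grid, (grid.headD []).length ≤ row.length) ∧
    ((grid.headD []).length = 0 ∨ (∀ row ∈ grid, row.length = (grid.headD []).length) ∨
      grid.any (fun row => (row.take (grid.headD []).length).any (fun x => x != 0)) = true)
instance (grid : List (List Int)) : Decidable (Pre_mirror_objects_h grid) := by
  unfold Pre_mirror_objects_h; infer_instance

def pvWitness_mirror_objects_h : List (List Int) := [[1, 0], [0, 2]]

def Spec_mirror_objects_h (grid : List (List Int)) (out : List (List Int)) : Prop := out = mirror_objects_h_alt grid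
instance (grid : List (List Int)) (out : List (List Int)) : Decidable (Spec_mirror_objects_h grid out) := by unfold Spec_mirror_objects_h; infer_instance

-- ===== CLAIM (what is proved, stated in full; the proofs are below) =====
def Claim_equal_mirror_objects_h : Prop := ∀ (grid : List (List Int)), Dom_mirror_objects_h grid → Pre_mirror_objects_h grid → Spec_mirror_objects_h grid (mirror_objects_h grid)

-- ===== LEMMAS AND PROOFS =====

-- connectivity relation both traversals compute
def pvGood (grid : List (List Int)) (h w color : Int) (p : Int × Int) : Prop :=
  pvInb h w p = true ∧ pvCellAt grid p = color

def pvStep (grid : List (List Int)) (h w color : Int) (p q : Int × Int) : Prop :=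
  q ∈ pvNbrs p ∧ pvGood grid h w color q

def pvReach (grid : List (List Int)) (h w color : Int) (s q : Int × Int) : Prop :=
  Relation.ReflTransGen (pvStep grid h w color) s q

theorem pvReach_good {grid : List (List Int)} {h w color : Int} {s q : Int × Int}
    (hs : pvGood grid h w color s) (hr : pvReach grid h w color s q) :
    pvGood grid h w color q := by
  induction hr with
  | refl => exact hs
  | tail hab hbc ih => exact hbc.2

theorem pvNbrs_symm {p q : Int × Int} (hq : q ∈ pvNbrs p) : p ∈ pvNbrs q := by
  simp only [pvNbrs, List.mem_cons, List.not_mem_nil, or_false] at hq ⊢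
  rcases hq with rfl | rfl | rfl | rfl <;> simp [Prod.ext_iff]

theorem pv_mem_iff_dropLast_getLast {α : Type} {l : List α} (hl : ¬ l = []) (q : α) :
    q ∈ l ↔ q ∈ l.dropLast ∨ q = l.getLast hl := by
  conv_lhs => rw [← List.dropLast_concat_getLast hl]
  simp

theorem pvReach_symm {grid : List (List Int)} {h w color : Int} {s q : Int × Int}
    (hs : pvGood grid h w color s) (hr : pvReach grid h w color s q) :
    pvReach grid h w color q s := by
  induction hr with
  | refl => exact Relation.ReflTransGen.refl
  | tail hab hbc ih =>
    exact Relation.ReflTransGen.head ⟨pvNbrs_symm hbc.1, pvReach_good hs hab⟩ ih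

-- the DFS flood loop computes exactly the reachable class of its seed
theorem pvFlood_main (grid : List (List Int)) (h w color : Int) (s : Int × Int)
    (v₀ : List (Int × Int)) (hs : pvGood grid h w color s)
    (HE : ∀ q, pvReach grid h w color s q → q ∉ v₀) :
    ∀ (visited pixels : PySem.Set (Int × Int)) (stack : List (Int × Int))
      (hv : visited.Nodup ∧ ∀ p ∈ visited, pvInb h w p = true),
      (∀ x, x ∈ visited ↔ x ∈ v₀ ∨ x ∈ pixels) →
      (∀ x ∈ pixels, pvGood grid h w color x ∧ pvReach grid h w color s x) →
      pixels.Nodup →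
      (∀ q ∈ stack, pvGood grid h w color q → pvReach grid h w color s q) →
      (∀ p ∈ pixels, ∀ q ∈ pvNbrs p, pvGood grid h w color q → q ∈ visited ∨ q ∈ stack) →
      (s ∈ pixels ∨ s ∈ stack) →
      (∀ x, x ∈ (pvFlood grid h w color visited pixels stack hv).1.2 ↔
          pvReach grid h w color s x) ∧
      (∀ x, x ∈ (pvFlood grid h w color visited pixels stack hv).1.1 ↔
          x ∈ v₀ ∨ pvReach grid h w color s x) ∧
      (pvFlood grid h w color visited pixels stack hv).1.2.Nodup := by
  intro visited pixels stack hv HA HB HBn HC HD HF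
  revert HA HB HBn HC HD HF
  fun_induction pvFlood grid h w color visited pixels stack hv with
  | case1 visited pixels hv =>
    intro HA HB HBn HC HD HF
    have hmem : ∀ x, pvReach grid h w color s x → x ∈ pixels := by
      intro x hx
      induction hx with
      | refl =>
        rcases HF with hsp | hsp
        · exact hsp
        · cases hsp
      | tail hab hbc ih =>
        rcases HD _ ih _ hbc.1 hbc.2 with hq | hq
        · rcases (HA _).1 hq with hq0 | hq0
          · exact absurd hq0 (HE _ (hab.tail hbc))
          · exact hq0
        · cases hq
    refine ⟨fun x => ⟨fun hx => (HB x hx).2, hmem x⟩, fun x => ?_, HBn⟩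
    rw [HA x]
    constructor
    · rintro (hx | hx)
      · exact Or.inl hx
      · exact Or.inr (HB x hx).2
    · rintro (hx | hx)
      · exact Or.inl hx
      · exact Or.inr (hmem x hx)
  | case2 visited pixels stack hv hst p rest hvis ih =>
    intro HA HB HBn HC HD HF
    have hmemstack : ∀ q, q ∈ stack ↔ q ∈ stack.dropLast ∨ q = stack.getLast hst :=
      fun q => pv_mem_iff_dropLast_getLast hst q
    have hpv : stack.getLast hst ∈ visited := (PySem.Set.contains_iff _ _).1 hvis
    apply ih
    · exact HA
    · exact HB
    · exact HBn
    · intro q hq hg; exact HC q ((hmemstack q).2 (Or.inl hq)) hg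
    · intro p hp q hq hg
      rcases HD p hp q hq hg with hq1 | hq1
      · exact Or.inl hq1
      · rcases (hmemstack q).1 hq1 with hq2 | hq2
        · exact Or.inr hq2
        · exact Or.inl (hq2 ▸ hpv)
    · rcases HF with hsp | hsp
      · exact Or.inl hsp
      · rcases (hmemstack s).1 hsp with hs2 | hs2
        · exact Or.inr hs2
        · rcases (HA s).1 (hs2 ▸ hpv) with hs3 | hs3
          · exact absurd hs3 (HE s Relation.ReflTransGen.refl)
          · exact Or.inl hs3
  | case3 visited pixels stack hv hst p rest hvis hib ih =>
    intro HA HB HBn HC HD HF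
    have hnotgood : ¬ pvGood grid h w color (stack.getLast hst) := by
      intro hg; rw [hg.1] at hib; cases hib
    have hmemstack : ∀ q, q ∈ stack ↔ q ∈ stack.dropLast ∨ q = stack.getLast hst :=
      fun q => pv_mem_iff_dropLast_getLast hst q
    apply ih
    · exact HA
    · exact HB
    · exact HBn
    · intro q hq hg; exact HC q ((hmemstack q).2 (Or.inl hq)) hg
    · intro p hp q hq hg
      rcases HD p hp q hq hg with hq1 | hq1
      · exact Or.inl hq1
      · rcases (hmemstack q).1 hq1 with hq2 | hq2
        · exact Or.inr hq2
        · exact absurd (hq2 ▸ hg) hnotgood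
    · rcases HF with hsp | hsp
      · exact Or.inl hsp
      · rcases (hmemstack s).1 hsp with hs2 | hs2
        · exact Or.inr hs2
        · exact absurd (hs2 ▸ hs) hnotgood
  | case4 visited pixels stack hv hst p rest hvis hib hcol ih =>
    intro HA HB HBn HC HD HF
    have hnotgood : ¬ pvGood grid h w color (stack.getLast hst) := fun hg => hcol hg.2
    have hmemstack : ∀ q, q ∈ stack ↔ q ∈ stack.dropLast ∨ q = stack.getLast hst :=
      fun q => pv_mem_iff_dropLast_getLast hst q
    apply ih
    · exact HA
    · exact HB
    · exact HBn
    · intro q hq hg; exact HC q ((hmemstack q).2 (Or.inl hq)) hg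
    · intro p hp q hq hg
      rcases HD p hp q hq hg with hq1 | hq1
      · exact Or.inl hq1
      · rcases (hmemstack q).1 hq1 with hq2 | hq2
        · exact Or.inr hq2
        · exact absurd (hq2 ▸ hg) hnotgood
    · rcases HF with hsp | hsp
      · exact Or.inl hsp
      · rcases (hmemstack s).1 hsp with hs2 | hs2
        · exact Or.inr hs2
        · exact absurd (hs2 ▸ hs) hnotgood
  | case5 visited pixels stack hv hst p rest hvis hib hcol ih =>
    intro HA HB HBn HC HD HF
    have hmemstack : ∀ q, q ∈ stack ↔ q ∈ stack.dropLast ∨ q = stack.getLast hst :=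
      fun q => pv_mem_iff_dropLast_getLast hst q
    have hpgood : pvGood grid h w color (stack.getLast hst) := by
      refine ⟨?_, not_not.1 hcol⟩
      cases hq : pvInb h w (stack.getLast hst)
      · exact absurd hq hib
      · rfl
    have hpreach : pvReach grid h w color s (stack.getLast hst) :=
      HC _ ((hmemstack _).2 (Or.inr rfl)) hpgood
    apply ih
    · intro x
      rw [PySem.Set.mem_add, PySem.Set.mem_add, HA x]
      constructor
      · rintro ((hx | hx) | rfl)
        · exact Or.inl hx
        · exact Or.inr (Or.inl hx)
        · exact Or.inr (Or.inr rfl)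
      · rintro (hx | hx | rfl)
        · exact Or.inl (Or.inl hx)
        · exact Or.inl (Or.inr hx)
        · exact Or.inr rfl
    · intro x hx
      rcases (PySem.Set.mem_add _ _ _).1 hx with hx1 | rfl
      · exact HB x hx1
      · exact ⟨hpgood, hpreach⟩
    · exact PySem.Set.nodup_add _ _ HBn
    · intro q hq hg
      rcases List.mem_append.1 hq with hq1 | hq1
      · exact HC q ((hmemstack q).2 (Or.inl hq1)) hg
      · exact hpreach.tail ⟨hq1, hg⟩
    · intro x hx q hq hg
      rcases (PySem.Set.mem_add _ _ _).1 hx with hx1 | rfl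
      · rcases HD x hx1 q hq hg with hq1 | hq1
        · exact Or.inl ((PySem.Set.mem_add _ _ _).2 (Or.inl hq1))
        · rcases (hmemstack q).1 hq1 with hq2 | hq2
          · exact Or.inr (List.mem_append.2 (Or.inl hq2))
          · exact Or.inl ((PySem.Set.mem_add _ _ _).2 (Or.inr hq2))
      · exact Or.inr (List.mem_append.2 (Or.inr hq))
    · rcases HF with hsp | hsp
      · exact Or.inl ((PySem.Set.mem_add _ _ _).2 (Or.inl hsp))
      · rcases (hmemstack s).1 hsp with hs2 | hs2
        · exact Or.inr (List.mem_append.2 (Or.inl hs2))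
        · exact Or.inl ((PySem.Set.mem_add _ _ _).2 (Or.inr hs2))

-- the saturation loop computes exactly the reachable class of its seed
theorem pvSat_main (grid : List (List Int)) (h w color : Int) (s : Int × Int)
    (_hs : pvGood grid h w color s) :
    ∀ (comp : PySem.Set (Int × Int))
      (hc : comp.Nodup ∧ ∀ p ∈ comp, pvInb h w p = true),
      s ∈ comp →
      (∀ x ∈ comp, pvGood grid h w color x ∧ pvReach grid h w color s x) →
      ∀ x, x ∈ (pvSat grid h w color comp hc).1 ↔ pvReach grid h w color s x := by
  intro comp hc hsin hall
  revert hsin hall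
  fun_induction pvSat grid h w color comp hc with
  | case1 comp hc hfr =>
    intro hsin hall x
    constructor
    · intro hx; exact (hall x hx).2
    · intro hx
      induction hx with
      | refl => exact hsin
      | @tail b c hab hbc ih =>
        by_cases hcc : c ∈ comp
        · exact hcc
        · exfalso
          have hcfr : c ∈ pvFrontier grid h w color comp := by
            rw [pvFrontier_mem]
            refine ⟨⟨b, ih, hbc.1⟩, ?_⟩
            simp only [Bool.and_eq_true, Bool.not_eq_true', beq_iff_eq]
            refine ⟨⟨hbc.2.1, ?_⟩, hbc.2.2⟩
            cases hcb : PySem.Set.contains comp c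
            · rfl
            · exact absurd ((PySem.Set.contains_iff _ _).1 hcb) hcc
          rw [hfr] at hcfr
          cases hcfr
  | case2 comp hc hfr fr ih =>
    intro hsin hall
    apply ih
    · exact (PySem.Set.mem_union _ _ _).2 (Or.inl hsin)
    · intro x hx
      rcases (PySem.Set.mem_union _ _ _).1 hx with hx1 | hx1
      · exact hall x hx1
      · have hch := (pvFrontier_mem grid h w color comp x).1 hx1
        obtain ⟨⟨p, hp, hnb⟩, hbool⟩ := hch
        simp only [Bool.and_eq_true, beq_iff_eq] at hbool
        exact ⟨⟨hbool.1.1, hbool.2⟩, (hall p hp).2.tail ⟨hnb, ⟨hbool.1.1, hbool.2⟩⟩⟩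

-- value of min/max is permutation-invariant
theorem pvMin?_getD_perm {xs ys : List Int} (hp : xs.Perm ys) :
    (PySem.List.min? xs (fun x => x)).getD 0 = (PySem.List.min? ys (fun x => x)).getD 0 := by
  rcases hxs : PySem.List.min? xs (fun x => x) with _ | m
  · have hx : xs = [] := (PySem.List.min?_eq_none_iff _ _).1 hxs
    subst hx
    have hy : ys = [] := hp.symm.eq_nil
    subst hy
    rfl
  · rcases hys : PySem.List.min? ys (fun x => x) with _ | m'
    · have hy : ys = [] := (PySem.List.min?_eq_none_iff _ _).1 hys
      subst hy
      have hx : xs = [] := hp.eq_nil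
      subst hx
      rw [(PySem.List.min?_eq_none_iff ([] : List Int) (fun x => x)).2 rfl] at hxs
      cases hxs
    · have h1 := PySem.List.min?_isMin hxs
      have h2 := PySem.List.min?_isMin hys
      have hm := PySem.List.min?_mem hxs
      have hm' := PySem.List.min?_mem hys
      simp only [Option.getD_some]
      exact le_antisymm (h1 m' (hp.symm.subset hm')) (h2 m (hp.subset hm))

theorem pvMax?_getD_perm {xs ys : List Int} (hp : xs.Perm ys) :
    (PySem.List.max? xs (fun x => x)).getD 0 = (PySem.List.max? ys (fun x => x)).getD 0 := by
  rcases hxs : PySem.List.max? xs (fun x => x) with _ | m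
  · have hx : xs = [] := (PySem.List.max?_eq_none_iff _ _).1 hxs
    subst hx
    have hy : ys = [] := hp.symm.eq_nil
    subst hy
    rfl
  · rcases hys : PySem.List.max? ys (fun x => x) with _ | m'
    · have hy : ys = [] := (PySem.List.max?_eq_none_iff _ _).1 hys
      subst hy
      have hx : xs = [] := hp.eq_nil
      subst hx
      rw [(PySem.List.max?_eq_none_iff ([] : List Int) (fun x => x)).2 rfl] at hxs
      cases hxs
    · have h1 := PySem.List.max?_isMax hxs
      have h2 := PySem.List.max?_isMax hys
      have hm := PySem.List.max?_mem hxs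
      have hm' := PySem.List.max?_mem hys
      simp only [Option.getD_some]
      exact le_antisymm (h2 m (hp.subset hm)) (h1 m' (hp.symm.subset hm'))

theorem pv_contains_eq_false {s : PySem.Set (Int × Int)} {x : Int × Int} (h : x ∉ s) :
    PySem.Set.contains s x = false := by
  cases hc : PySem.Set.contains s x
  · rfl
  · exact absurd ((PySem.Set.contains_iff _ _).1 hc) h

theorem pvForall₂_append {α β : Type} {R : α → β → Prop} {l1 l2 : List α} {m1 m2 : List β}
    (h1 : List.Forall₂ R l1 m1) (h2 : List.Forall₂ R l2 m2) :
    List.Forall₂ R (l1 ++ l2) (m1 ++ m2) := by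
  induction h1 with
  | nil => exact h2
  | cons h t ih => exact List.Forall₂.cons h ih

-- relation between A's and B's per-component records: same color, same pixel set, same column bbox
def pvRel (a : PComp) (b : Int × List (Int × Int) × Int × Int) : Prop :=
  a.color = b.1 ∧ a.pixels.Perm b.2.1 ∧ a.bbox.2.1 = b.2.2.1 ∧ a.bbox.2.2.2 = b.2.2.2

-- the two scans stay aligned step by step
theorem pvScan_align (grid : List (List Int)) (h w : Int) :
    ∀ (cells : List (Int × Int)) (visited covered : PySem.Set (Int × Int))
      (compsA : List PComp) (compsB : List (Int × List (Int × Int) × Int × Int))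
      (hv : visited.Nodup ∧ ∀ p ∈ visited, pvInb h w p = true)
      (hcov : covered.Nodup ∧ ∀ p ∈ covered, pvInb h w p = true)
      (hcells : ∀ p ∈ cells, pvInb h w p = true),
      (∀ x, x ∈ visited ↔ x ∈ covered) →
      (∀ x, x ∈ visited ↔ ∃ cA ∈ compsA, x ∈ cA.pixels) →
      List.Forall₂ pvRel compsA compsB →
      (∀ cA ∈ compsA, ∃ sd, pvGood grid h w cA.color sd ∧
        (∀ x, x ∈ cA.pixels ↔ pvReach grid h w cA.color sd x)) →
      List.Forall₂ pvRel (pvScanA grid h w cells visited compsA hv)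
          (pvScanB grid h w cells covered compsB hcov hcells).2 ∧
        (∀ x, x ∈ (pvScanB grid h w cells covered compsB hcov hcells).1 ↔
          ∃ cA ∈ pvScanA grid h w cells visited compsA hv, x ∈ cA.pixels) := by
  intro cells
  induction cells with
  | nil =>
    intro visited covered compsA compsB hv hcov hcells hm hu hf hcl
    refine ⟨hf, ?_⟩
    intro x
    simp only [pvScanA, pvScanB]
    rw [← hm x]
    exact hu x
  | cons p rest ih =>
    intro visited covered compsA compsB hv hcov hcells hm hu hf hcl
    have hccov : PySem.Set.contains covered p = PySem.Set.contains visited p := by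
      by_cases hpc : p ∈ visited
      · rw [(PySem.Set.contains_iff _ _).2 hpc, (PySem.Set.contains_iff _ _).2 ((hm p).1 hpc)]
      · rw [pv_contains_eq_false hpc, pv_contains_eq_false (fun hc => hpc ((hm p).2 hc))]
    by_cases hcond : ¬ pvCellAt grid p = 0 ∧ ¬ PySem.Set.contains visited p = true
    · -- both take the component branch
      have hpin : pvInb h w p = true := hcells p List.mem_cons_self
      have hpgood : pvGood grid h w (pvCellAt grid p) p := ⟨hpin, rfl⟩
      -- the reachable class of p avoids the already-visited set
      have HE : ∀ q, pvReach grid h w (pvCellAt grid p) p q → q ∉ visited := by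
        intro q hq hqv
        obtain ⟨cA, hcA, hqc⟩ := (hu q).1 hqv
        obtain ⟨sd, hsd, hsdmem⟩ := hcl cA hcA
        have hq1 : pvReach grid h w cA.color sd q := (hsdmem q).1 hqc
        have hcolq : pvCellAt grid q = pvCellAt grid p := (pvReach_good hpgood hq).2
        have hcolq' : pvCellAt grid q = cA.color := (pvReach_good hsd hq1).2
        have hcoleq : cA.color = pvCellAt grid p := by rw [← hcolq', hcolq]
        have hq2 : pvReach grid h w cA.color q p := by
          rw [hcoleq]
          exact pvReach_symm hpgood hq
        have hsdp : pvReach grid h w cA.color sd p := hq1.trans hq2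
        have : p ∈ visited := (hu p).2 ⟨cA, hcA, (hsdmem p).2 hsdp⟩
        exact hcond.2 ((PySem.Set.contains_iff _ _).2 this)
      have HE' : ∀ q, pvReach grid h w (pvCellAt grid p) p q → q ∉ (visited : List (Int × Int)) := HE
      -- A's flood computes the class
      have hfl := pvFlood_main grid h w (pvCellAt grid p) p visited hpgood HE'
        visited PySem.Set.empty [p] hv
        (by intro x; simp)
        (by intro x hx; cases hx)
        List.nodup_nil
        (by intro q hq hg; rcases List.mem_singleton.1 hq with rfl; exact Relation.ReflTransGen.refl)
        (by intro x hx; cases hx)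
        (Or.inr List.mem_cons_self)
      -- B's saturation computes the class
      have hsat := pvSat_main grid h w (pvCellAt grid p) p hpgood [p]
        ⟨List.nodup_singleton p, by intro q hq; rcases List.mem_singleton.1 hq with rfl; exact hpin⟩
        List.mem_cons_self
        (by intro x hx; rcases List.mem_singleton.1 hx with rfl
            exact ⟨hpgood, Relation.ReflTransGen.refl⟩)
      -- restate saturation facts at pvComponentOf (definitionally equal, proof-irrelevant args)
      have hsat' : ∀ x, x ∈ (pvComponentOf grid h w p (hcells p List.mem_cons_self)).1 ↔
          pvReach grid h w (pvCellAt grid p) p x := hsat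
      have hsinv' : (pvComponentOf grid h w p (hcells p List.mem_cons_self)).1.Nodup :=
        (pvComponentOf grid h w p (hcells p List.mem_cons_self)).2.1
      -- the two pixel lists are permutations of each other
      have hpermpix : (pvFlood grid h w (pvCellAt grid p) visited PySem.Set.empty [p] hv).1.2.Perm
          (pvComponentOf grid h w p (hcells p List.mem_cons_self)).1 := by
        rw [List.perm_ext_iff_of_nodup hfl.2.2 hsinv']
        intro x
        rw [hfl.1 x]
        exact (hsat' x).symm
      -- reduce both scans one step
      rw [pvScanA, pvScanB]
      have hcondB : ¬ pvCellAt grid p = 0 ∧ ¬ PySem.Set.contains covered p = true := by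
        rw [hccov]; exact hcond
      rw [if_pos hcond, if_pos hcondB]
      apply ih
      · -- memberships of new visited and covered agree
        intro x
        rw [hfl.2.1 x, PySem.Set.mem_union, ← hm x]
        constructor
        · rintro (hx | hx)
          · exact Or.inl hx
          · exact Or.inr ((hsat' x).2 hx)
        · rintro (hx | hx)
          · exact Or.inl hx
          · exact Or.inr ((hsat' x).1 hx)
      · -- new visited = union of new comps' pixels
        intro x
        rw [hfl.2.1 x]
        constructor
        · rintro (hx | hx)
          · obtain ⟨cA, hcA, hxc⟩ := (hu x).1 hx
            exact ⟨cA, List.mem_append.2 (Or.inl hcA), hxc⟩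
          · refine ⟨_, List.mem_append.2 (Or.inr List.mem_cons_self), ?_⟩
            show x ∈ (pvFlood grid h w (pvCellAt grid p) visited PySem.Set.empty [p] hv).1.2
            exact (hfl.1 x).2 hx
        · rintro ⟨cA, hcA, hxc⟩
          rcases List.mem_append.1 hcA with hcA | hcA
          · exact Or.inl ((hu x).2 ⟨cA, hcA, hxc⟩)
          · rcases List.mem_singleton.1 hcA with rfl
            exact Or.inr ((hfl.1 x).1 hxc)
      · -- relation extended by the new pair
        refine pvForall₂_append hf ?_
        refine List.forall₂_cons.2 ⟨?_, List.Forall₂.nil⟩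
        refine ⟨rfl, hpermpix, ?_, ?_⟩
        · exact pvMin?_getD_perm (hpermpix.map (fun q => q.2))
        · exact pvMax?_getD_perm (hpermpix.map (fun q => q.2))
      · -- class description extended
        intro cA hcA
        rcases List.mem_append.1 hcA with hcA | hcA
        · exact hcl cA hcA
        · rcases List.mem_singleton.1 hcA with rfl
          exact ⟨p, hpgood, hfl.1⟩
    · -- both skip this cell
      rw [pvScanA, pvScanB]
      have hcondB : ¬ (¬ pvCellAt grid p = 0 ∧ ¬ PySem.Set.contains covered p = true) := by
        rw [hccov]; exact hcond
      rw [if_neg hcond, if_neg hcondB]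
      exact ih visited covered compsA compsB hv hcov _ hm hu hf hcl

-- if A's scan produces no component, every scanned cell is background or already visited
theorem pvScanA_eq_nil (grid : List (List Int)) (h w : Int) :
    ∀ (cells : List (Int × Int)) (visited : PySem.Set (Int × Int)) (comps : List PComp) hv,
      pvScanA grid h w cells visited comps hv = [] →
      comps = [] ∧ ∀ p ∈ cells, ¬ pvCellAt grid p = 0 → PySem.Set.contains visited p = true := by
  intro cells
  induction cells with
  | nil =>
    intro visited comps hv hnil
    rw [pvScanA] at hnil
    exact ⟨hnil, by intro p hp; cases hp⟩
  | cons p rest ih =>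
    intro visited comps hv hnil
    rw [pvScanA] at hnil
    by_cases hcond : ¬ pvCellAt grid p = 0 ∧ ¬ PySem.Set.contains visited p = true
    · rw [if_pos hcond] at hnil
      have := (ih _ _ _ hnil).1
      simp at this
    · rw [if_neg hcond] at hnil
      obtain ⟨h1, h2⟩ := ih _ _ _ hnil
      refine ⟨h1, ?_⟩
      intro q hq hq0
      rcases List.mem_cons.1 hq with rfl | hq
      · rcases not_and_or.1 hcond with hc | hc
        · exact absurd hq0 (by simpa using hc)
        · simpa using hc
      · exact h2 q hq hq0

-- ---- matrix-write normalization ----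

-- normalized (possibly out-of-range) index of a Python indexed assignment / read
def pvIdx (n : Nat) (i : Int) : Nat := (PySem.List.pyIdx? n i).getD n

theorem pvSetD_eq_set {α : Type} (xs : List α) (i : Int) (v : α) :
    PySem.List.pySetD xs i v = xs.set (pvIdx xs.length i) v := by
  unfold PySem.List.pySetD PySem.List.pySet? pvIdx PySem.List.pyIdx?
  split_ifs with h1 h2 h3
  · rfl
  · simp only [Option.map_none, Option.getD_none]
    exact (List.set_eq_of_length_le le_rfl).symm
  · rfl
  · simp only [Option.map_none, Option.getD_none]
    exact (List.set_eq_of_length_le le_rfl).symm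

theorem pvGetD_eq_getD {α : Type} (xs : List α) (i : Int) (d : α) :
    PySem.List.pyGetD xs i d = xs.getD (pvIdx xs.length i) d := by
  unfold PySem.List.pyGetD PySem.List.pyGet? pvIdx PySem.List.pyIdx?
  have hnone : xs[xs.length]? = none := List.getElem?_eq_none_iff.2 le_rfl
  split_ifs with h1 h2 h3
  · simp [List.getD_eq_getElem?_getD]
  · simp [List.getD_eq_getElem?_getD, hnone]
  · simp [List.getD_eq_getElem?_getD]
  · simp [List.getD_eq_getElem?_getD, hnone]

theorem pvSet2_length (m : List (List Int)) (r c : Int) (v : Int) :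
    (pvSet2 m r c v).length = m.length := by
  unfold pvSet2
  rw [PySem.List.length_pySetD]

theorem pvSet2_getElem? (m : List (List Int)) (r c : Int) (v : Int) (i : Nat) :
    (pvSet2 m r c v)[i]? =
      if i = pvIdx m.length r then m[i]?.map (fun row => row.set (pvIdx row.length c) v)
      else m[i]? := by
  unfold pvSet2
  rw [pvSetD_eq_set, pvGetD_eq_getD, pvSetD_eq_set, List.getElem?_set]
  by_cases hi : pvIdx m.length r = i
  · subst hi
    by_cases hlt : pvIdx m.length r < m.length
    · rw [if_pos rfl, if_pos hlt, if_pos rfl, List.getElem?_eq_getElem hlt]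
      simp only [Option.map_some, Option.some.injEq]
      rw [List.getD_eq_getElem _ _ hlt]
    · rw [if_pos rfl, if_neg hlt, if_pos rfl, List.getElem?_eq_none_iff.2 (by omega)]
      rfl
  · rw [if_neg hi, if_neg (fun hh => hi hh.symm)]

theorem pvSet2_comm (m : List (List Int)) (r1 c1 r2 c2 : Int) (v : Int) :
    pvSet2 (pvSet2 m r1 c1 v) r2 c2 v = pvSet2 (pvSet2 m r2 c2 v) r1 c1 v := by
  apply List.ext_getElem?
  intro i
  simp only [pvSet2_getElem?, pvSet2_length]
  by_cases h1 : i = pvIdx m.length r1 <;> by_cases h2 : i = pvIdx m.length r2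
  · simp only [if_pos h1, if_pos h2]
    cases hm : m[i]? with
    | none => rfl
    | some row =>
      simp only [Option.map_some, List.length_set, Option.some.injEq]
      by_cases hc : pvIdx row.length c1 = pvIdx row.length c2
      · rw [hc, List.set_set]
      · exact List.set_comm _ _ hc
  · simp only [if_pos h1, if_neg h2]
  · simp only [if_neg h1, if_pos h2]
  · simp only [if_neg h1, if_neg h2]

theorem pvRange_natCast (n : Nat) :
    PySem.List.pyRange 0 (n : Int) 1 = (List.range n).map (fun k : Nat => (k : Int)) := by
  have hcast : ((n : Int) - 0).toNat = n := by simp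
  rw [PySem.List.pyRange_one, hcast]
  apply List.map_congr_left
  intro k _
  exact zero_add _

-- a row-level fold of guarded positional writes is a map
theorem pvRowFold (P : Int → Prop) [DecidablePred P] (g : Int → Int) :
    ∀ (n : Nat) (row0 : List Int), n ≤ row0.length →
    ((List.range n).map (fun k : Nat => (k : Int))).foldl
        (fun row c => if P c then PySem.List.pySetD row c (g c) else row) row0
      = (List.range n).map (fun k : Nat => if P (k : Int) then g (k : Int) else row0.getD k 0)
        ++ row0.drop n := by
  intro n
  induction n with
  | zero => intro row0 _; simp
  | succ n ih =>
    intro row0 hlen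
    have hn : n < row0.length := by omega
    rw [List.range_succ]
    simp only [List.map_append, List.map_cons, List.map_nil, List.foldl_append,
      List.foldl_cons, List.foldl_nil]
    rw [ih row0 (by omega)]
    have hmaplen : ((List.range n).map
        (fun k : Nat => if P (k : Int) then g (k : Int) else row0.getD k 0)).length = n := by
      simp
    have hdrop : row0.drop n = row0[n] :: row0.drop (n + 1) := List.drop_eq_getElem_cons hn
    by_cases hp : P (n : Int)
    · rw [if_pos hp, if_pos hp, PySem.List.pySetD_natCast, hdrop,
        List.set_append_right _ _ (le_of_eq hmaplen), hmaplen, Nat.sub_self, List.set_cons_zero]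
      simp
    · rw [if_neg hp, if_neg hp, hdrop, List.getD_eq_getElem _ _ hn]
      simp

-- a guarded pvSet2 fold along one row only rewrites that row
theorem pvMatFoldRow (Q : Int → Prop) [DecidablePred Q] (val : Int → Int) (r : Int) :
    ∀ (l : List Int) (M : List (List Int)), 0 ≤ r → r < (M.length : Int) →
    l.foldl (fun res c => if Q c then pvSet2 res r c (val c) else res) M
      = PySem.List.pySetD M r (l.foldl
          (fun row c => if Q c then PySem.List.pySetD row c (val c) else row)
          (PySem.List.pyGetD M r [])) := by
  intro l
  induction l with
  | nil =>
    intro M h0 hr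
    simp only [List.foldl_nil]
    rw [PySem.List.pySetD_of_nonneg _ _ h0, PySem.List.pyGetD_of_nonneg _ _ h0]
    have hlt : r.toNat < M.length := by omega
    rw [List.getD_eq_getElem _ _ hlt, List.set_getElem_self]
  | cons c l ih =>
    intro M h0 hr
    simp only [List.foldl_cons]
    by_cases hq : Q c
    · rw [if_pos hq, if_pos hq]
      have hlen : (pvSet2 M r c (val c)).length = M.length := pvSet2_length M r c (val c)
      rw [ih _ h0 (by rw [hlen]; exact hr)]
      have hlt : r.toNat < M.length := by omega
      unfold pvSet2
      simp only [PySem.List.pySetD_of_nonneg _ _ h0, PySem.List.pyGetD_of_nonneg _ _ h0]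
      have hrow : (M.set r.toNat (PySem.List.pySetD (M.getD r.toNat []) c (val c))).getD r.toNat
          ([] : List Int) = PySem.List.pySetD (M.getD r.toNat []) c (val c) := by
        rw [List.getD_eq_getElem?_getD, List.getElem?_set_self hlt]
        rfl
      rw [hrow, List.set_set]
    · rw [if_neg hq, if_neg hq, ih _ h0 hr]

-- the full guarded matrix-write double fold is a map over rows
theorem pvMatFold (P : Int × Int → Prop) [DecidablePred P] (g : Int × Int → Int)
    (cl : List Int) :
    ∀ (n : Nat) (M : List (List Int)), n ≤ M.length →
    ((List.range n).map (fun k : Nat => (k : Int))).foldl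
        (fun res r => cl.foldl
          (fun res c => if P (r, c) then pvSet2 res r c (g (r, c)) else res) res) M
      = (List.range n).map (fun k : Nat => cl.foldl
          (fun row c => if P ((k : Int), c) then PySem.List.pySetD row c (g ((k : Int), c)) else row)
          (M.getD k []))
        ++ M.drop n := by
  intro n
  induction n with
  | zero => intro M _; simp
  | succ n ih =>
    intro M hlen
    have hn : n < M.length := by omega
    rw [List.range_succ]
    simp only [List.map_append, List.map_cons, List.map_nil, List.foldl_append,
      List.foldl_cons, List.foldl_nil]
    rw [ih M (by omega)]
    have hmaplen : ((List.range n).map (fun k : Nat => cl.foldl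
          (fun row c => if P ((k : Int), c) then PySem.List.pySetD row c (g ((k : Int), c)) else row)
          (M.getD k []))).length = n := by simp
    have hprevlen : ((List.range n).map (fun k : Nat => cl.foldl
          (fun row c => if P ((k : Int), c) then PySem.List.pySetD row c (g ((k : Int), c)) else row)
          (M.getD k [])) ++ M.drop n).length = M.length := by
      rw [List.length_append, hmaplen, List.length_drop]
      omega
    rw [pvMatFoldRow (fun c => P ((n : Int), c)) (fun c => g ((n : Int), c)) (n : Int) cl _
      (by omega) (by rw [hprevlen]; exact_mod_cast hn)]
    have hdrop : M.drop n = M[n] :: M.drop (n + 1) := List.drop_eq_getElem_cons hn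
    have hget : PySem.List.pyGetD ((List.range n).map (fun k : Nat => cl.foldl
          (fun row c => if P ((k : Int), c) then PySem.List.pySetD row c (g ((k : Int), c)) else row)
          (M.getD k [])) ++ M.drop n) (n : Int) [] = M.getD n [] := by
      rw [PySem.List.pyGetD_of_nonneg _ _ (by omega : (0:Int) ≤ (n : Int)), Int.toNat_natCast,
        List.getD_eq_getElem?_getD, List.getElem?_append_right (le_of_eq hmaplen)]
      rw [hmaplen, Nat.sub_self, hdrop]
      simp [List.getD_eq_getElem _ _ hn]
    rw [hget, PySem.List.pySetD_of_nonneg _ _ (by omega : (0:Int) ≤ (n : Int)), Int.toNat_natCast,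
      hdrop, List.set_append_right _ _ (le_of_eq hmaplen), hmaplen, Nat.sub_self,
      List.set_cons_zero]
    simp

-- membership in A's all_pixels accumulation
theorem pv_mem_foldl_update (l : List PComp) (s : PySem.Set (Int × Int)) (x : Int × Int) :
    x ∈ l.foldl (fun s c => PySem.Set.update s c.pixels) s ↔ x ∈ s ∨ ∃ c ∈ l, x ∈ c.pixels := by
  induction l generalizing s with
  | nil => simp
  | cons c l ih =>
    simp only [List.foldl_cons, ih, PySem.Set.mem_update]
    constructor
    · rintro ((hx | hx) | ⟨c', hc', hx⟩)
      · exact Or.inl hx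
      · exact Or.inr ⟨c, List.mem_cons_self, hx⟩
      · exact Or.inr ⟨c', List.mem_cons_of_mem _ hc', hx⟩
    · rintro (hx | ⟨c', hc', hx⟩)
      · exact Or.inl (Or.inl hx)
      · rcases List.mem_cons.1 hc' with rfl | hc'
        · exact Or.inl (Or.inr hx)
        · exact Or.inr ⟨c', hc', hx⟩

-- the two mirror-writing folds agree on related component lists
theorem pvMirror_eq :
    ∀ {la : List PComp} {lb : List (Int × List (Int × Int) × Int × Int)},
    List.Forall₂ pvRel la lb → ∀ (R : List (List Int)),
    la.foldl (fun res comp => comp.pixels.foldl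
        (fun res q => pvSet2 res q.1 (comp.bbox.2.2.2 - (q.2 - comp.bbox.2.1)) comp.color) res) R
      = lb.foldl (fun res t => t.2.1.foldl
        (fun res q => pvSet2 res q.1 (t.2.2.1 + t.2.2.2 - q.2) t.1) res) R := by
  intro la lb hf
  induction hf with
  | nil => intro R; rfl
  | @cons a b la lb hab htail ih =>
    intro R
    obtain ⟨hcol, hperm, hminc, hmaxc⟩ := hab
    simp only [List.foldl_cons]
    have hfun : (fun (res : List (List Int)) (q : Int × Int) =>
        pvSet2 res q.1 (a.bbox.2.2.2 - (q.2 - a.bbox.2.1)) a.color)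
        = (fun (res : List (List Int)) (q : Int × Int) =>
          pvSet2 res q.1 (b.2.2.1 + b.2.2.2 - q.2) b.1) := by
      funext res q
      rw [hcol, hminc, hmaxc]
      congr 1
      ring
    rw [hfun]
    rw [List.Perm.foldl_eq (rcomm := ⟨fun m x y => pvSet2_comm m x.1 _ y.1 _ b.1⟩) hperm R]
    exact ih _

-- membership in the row-major cell list
theorem pvCells_mem (h w : Int) (p : Int × Int) :
    p ∈ pvCells h w ↔ 0 ≤ p.1 ∧ p.1 < h ∧ 0 ≤ p.2 ∧ p.2 < w := by
  simp only [pvCells, List.mem_flatMap, List.mem_map]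
  constructor
  · rintro ⟨r, hr, c, hc, rfl⟩
    rw [PySem.List.mem_pyRange_one] at hr hc
    simp
    omega
  · rintro ⟨h1, h2, h3, h4⟩
    exact ⟨p.1, PySem.List.mem_pyRange_one.2 ⟨h1, h2⟩, p.2,
      PySem.List.mem_pyRange_one.2 ⟨h3, h4⟩, rfl⟩

def pvEmptyInv (h w : Int) :
    (PySem.Set.empty : PySem.Set (Int × Int)).Nodup ∧
      ∀ p ∈ (PySem.Set.empty : PySem.Set (Int × Int)), pvInb h w p = true :=
  ⟨List.nodup_nil, fun p hp => absurd hp (List.not_mem_nil)⟩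

theorem pvCellAt_natCast (g : List (List Int)) (i c : Nat) :
    pvCellAt g ((i : Int), (c : Int)) = (g.getD i []).getD c 0 := by
  unfold pvCellAt
  rw [PySem.List.pyGetD_natCast, PySem.List.pyGetD_natCast]

-- the two full pipelines agree on a nonempty grid with nonempty first row
theorem pv_core2 (r0 : List Int) (rest : List (List Int)) (hr0 : ¬ r0 = [])
    (hpre : Pre_mirror_objects_h (r0 :: rest))
    (pB : (PySem.Set.empty : PySem.Set (Int × Int)).Nodup ∧
      ∀ p ∈ (PySem.Set.empty : PySem.Set (Int × Int)),
        pvInb ((r0 :: rest).length : Int) (r0.length : Int) p = true)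
    (pC : ∀ p ∈ pvCells ((r0 :: rest).length : Int) (r0.length : Int),
        pvInb ((r0 :: rest).length : Int) (r0.length : Int) p = true) :
    (if pvScanA (r0 :: rest) ((r0 :: rest).length : Int) (r0.length : Int)
          (pvCells ((r0 :: rest).length : Int) (r0.length : Int)) PySem.Set.empty []
          (pvEmptyInv ((r0 :: rest).length : Int) (r0.length : Int)) = [] then r0 :: rest
      else
        List.foldl (fun res comp => List.foldl
            (fun res q => pvSet2 res q.1 (comp.bbox.2.2.2 - (q.2 - comp.bbox.2.1)) comp.color) res
            comp.pixels)
          (List.foldl (fun res r => List.foldl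
              (fun res c =>
                if ¬ (List.foldl (fun s c => s.update c.pixels) PySem.Set.empty
                    (pvScanA (r0 :: rest) ((r0 :: rest).length : Int) (r0.length : Int)
                      (pvCells ((r0 :: rest).length : Int) (r0.length : Int)) PySem.Set.empty []
                      (pvEmptyInv ((r0 :: rest).length : Int) (r0.length : Int)))).contains (r, c) = true then
                  pvSet2 res r c (pvCellAt (r0 :: rest) (r, c))
                else res)
              res (PySem.List.pyRange 0 (((r0 :: rest).headD []).length : Int) 1))
            (List.map (fun _ => List.map (fun _ => (0 : Int))
                (PySem.List.pyRange 0 (((r0 :: rest).headD []).length : Int) 1))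
              (PySem.List.pyRange 0 ((r0 :: rest).length : Int) 1))
            (PySem.List.pyRange 0 ((r0 :: rest).length : Int) 1))
          (pvScanA (r0 :: rest) ((r0 :: rest).length : Int) (r0.length : Int)
            (pvCells ((r0 :: rest).length : Int) (r0.length : Int)) PySem.Set.empty []
            (pvEmptyInv ((r0 :: rest).length : Int) (r0.length : Int))))
      = List.foldl (fun res t => List.foldl
            (fun res q => pvSet2 res q.1 (t.2.2.1 + t.2.2.2 - q.2) t.1) res t.2.1)
          (List.map (fun r => List.map (fun c =>
              if (pvScanB (r0 :: rest) ((r0 :: rest).length : Int) (r0.length : Int)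
                    (pvCells ((r0 :: rest).length : Int) (r0.length : Int)) PySem.Set.empty []
                    pB pC).1.contains (r, c) = true then 0
              else pvCellAt (r0 :: rest) (r, c))
              (PySem.List.pyRange 0 (r0.length : Int) 1))
            (PySem.List.pyRange 0 ((r0 :: rest).length : Int) 1))
          (pvScanB (r0 :: rest) ((r0 :: rest).length : Int) (r0.length : Int)
            (pvCells ((r0 :: rest).length : Int) (r0.length : Int)) PySem.Set.empty [] pB pC).2 := by
  simp only [List.headD_cons]
  obtain ⟨hF, hU⟩ := pvScan_align (r0 :: rest) ((r0 :: rest).length : Int) (r0.length : Int)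
    (pvCells ((r0 :: rest).length : Int) (r0.length : Int)) PySem.Set.empty PySem.Set.empty [] []
    (pvEmptyInv _ _) pB pC
    (fun _ => Iff.rfl)
    (by intro x
        constructor
        · intro hx; cases hx
        · rintro ⟨cA, hcA, -⟩; cases hcA)
    List.Forall₂.nil
    (by intro cA hcA; cases hcA)
  by_cases hAnil : pvScanA (r0 :: rest) ((r0 :: rest).length : Int) (r0.length : Int)
      (pvCells ((r0 :: rest).length : Int) (r0.length : Int)) PySem.Set.empty []
      (pvEmptyInv ((r0 :: rest).length : Int) (r0.length : Int)) = []
  · -- no components: A returns the grid, B rebuilds it unchanged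
    rw [if_pos hAnil]
    rw [hAnil] at hF
    have hBnil := List.forall₂_nil_left_iff.1 hF
    rw [hBnil, List.foldl_nil]
    have hcovnone : ∀ x : Int × Int,
        x ∉ (pvScanB (r0 :: rest) ((r0 :: rest).length : Int) (r0.length : Int)
          (pvCells ((r0 :: rest).length : Int) (r0.length : Int)) PySem.Set.empty [] pB pC).1 := by
      intro x hx
      obtain ⟨cA, hcA, -⟩ := (hU x).1 hx
      rw [hAnil] at hcA
      cases hcA
    obtain ⟨-, hall⟩ := pvScanA_eq_nil (r0 :: rest) ((r0 :: rest).length : Int) (r0.length : Int)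
      (pvCells ((r0 :: rest).length : Int) (r0.length : Int)) PySem.Set.empty [] (pvEmptyInv _ _) hAnil
    have hzero : ∀ p ∈ pvCells ((r0 :: rest).length : Int) (r0.length : Int),
        pvCellAt (r0 :: rest) p = 0 := by
      intro p hp
      by_contra hnz
      exact absurd ((PySem.Set.contains_iff _ _).1 (hall p hp hnz)) (List.not_mem_nil)
    have hrect : ∀ row ∈ (r0 :: rest), row.length = r0.length := by
      rcases hpre.2 with hw0 | hrect | hany
      · simp only [List.headD_cons] at hw0
        exact absurd (List.eq_nil_of_length_eq_zero hw0) hr0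
      · simpa using hrect
      · exfalso
        simp only [List.headD_cons] at hany
        rw [List.any_eq_true] at hany
        obtain ⟨row, hrow, hcell⟩ := hany
        rw [List.any_eq_true] at hcell
        obtain ⟨x, hx, hxne⟩ := hcell
        obtain ⟨c, hc, hcx⟩ := List.mem_iff_getElem.1 hx
        obtain ⟨i, hi, hig⟩ := List.mem_iff_getElem.1 hrow
        have hcw : c < r0.length := by
          have := hc; simp only [List.length_take] at this; omega
        have hcrow : c < row.length := by
          have := hc; simp only [List.length_take] at this; omega
        have hp : ((i : Int), (c : Int)) ∈ pvCells ((r0 :: rest).length : Int) (r0.length : Int) :=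
          (pvCells_mem _ _ _).2
            ⟨(Int.natCast_nonneg i : (0 : Int) ≤ (i : Int)),
             (by exact_mod_cast hi : (i : Int) < ((r0 :: rest).length : Int)),
             (Int.natCast_nonneg c : (0 : Int) ≤ (c : Int)),
             (by exact_mod_cast hcw : (c : Int) < (r0.length : Int))⟩
        have hcv : pvCellAt (r0 :: rest) ((i : Int), (c : Int)) = row[c] := by
          rw [pvCellAt_natCast, List.getD_eq_getElem _ _ hi, hig,
            List.getD_eq_getElem _ _ hcrow]
        have hx0 : x = row[c] := by
          rw [← hcx, List.getElem_take]
        rw [hx0] at hxne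
        have := hzero _ hp
        rw [hcv] at this
        simp [this] at hxne
    -- now  r0 :: rest  =  the rebuilt background grid
    simp only [pvRange_natCast]
    apply List.ext_getElem
    · simp
    · intro i hi1 hi2
      rw [List.getElem_map, List.getElem_map, List.getElem_range]
      have hilen : i < (r0 :: rest).length := hi1
      have hrowlen : (r0 :: rest)[i].length = r0.length :=
        hrect _ (List.getElem_mem hilen)
      apply List.ext_getElem
      · simp [hrowlen]
      · intro c hc1 hc2
        rw [List.getElem_map, List.getElem_map, List.getElem_range]
        rw [pv_contains_eq_false (hcovnone _)]
        simp only [Bool.false_eq_true, if_false]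
        rw [pvCellAt_natCast, List.getD_eq_getElem _ _ hilen, List.getD_eq_getElem _ _ hc1]
  · -- components exist: both build background then mirror; backgrounds agree
    rw [if_neg hAnil]
    have hAP : ∀ p : Int × Int,
        (List.foldl (fun s c => s.update c.pixels) PySem.Set.empty
          (pvScanA (r0 :: rest) ((r0 :: rest).length : Int) (r0.length : Int)
            (pvCells ((r0 :: rest).length : Int) (r0.length : Int)) PySem.Set.empty []
            (pvEmptyInv ((r0 :: rest).length : Int) (r0.length : Int)))).contains p
        = (pvScanB (r0 :: rest) ((r0 :: rest).length : Int) (r0.length : Int)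
            (pvCells ((r0 :: rest).length : Int) (r0.length : Int)) PySem.Set.empty []
            pB pC).1.contains p := by
      intro p
      by_cases hp : p ∈ (pvScanB (r0 :: rest) ((r0 :: rest).length : Int) (r0.length : Int)
          (pvCells ((r0 :: rest).length : Int) (r0.length : Int)) PySem.Set.empty [] pB pC).1
      · rw [(PySem.Set.contains_iff _ _).2 hp, (PySem.Set.contains_iff _ _).2 ?_]
        rw [pv_mem_foldl_update]
        exact Or.inr ((hU p).1 hp)
      · rw [pv_contains_eq_false hp, pv_contains_eq_false ?_]
        rw [pv_mem_foldl_update]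
        rintro (hx | hx)
        · cases hx
        · exact hp ((hU p).2 hx)
    have hbg :
        List.foldl (fun res r => List.foldl
            (fun res c =>
              if ¬ (List.foldl (fun s c => s.update c.pixels) PySem.Set.empty
                  (pvScanA (r0 :: rest) ((r0 :: rest).length : Int) (r0.length : Int)
                    (pvCells ((r0 :: rest).length : Int) (r0.length : Int)) PySem.Set.empty []
                    (pvEmptyInv ((r0 :: rest).length : Int) (r0.length : Int)))).contains (r, c) = true then
                pvSet2 res r c (pvCellAt (r0 :: rest) (r, c))
              else res)
            res (PySem.List.pyRange 0 (r0.length : Int) 1))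
          (List.map (fun _ => List.map (fun _ => (0 : Int))
              (PySem.List.pyRange 0 (r0.length : Int) 1))
            (PySem.List.pyRange 0 ((r0 :: rest).length : Int) 1))
          (PySem.List.pyRange 0 ((r0 :: rest).length : Int) 1)
        = List.map (fun r => List.map (fun c =>
              if (pvScanB (r0 :: rest) ((r0 :: rest).length : Int) (r0.length : Int)
                    (pvCells ((r0 :: rest).length : Int) (r0.length : Int)) PySem.Set.empty []
                    pB pC).1.contains (r, c) = true then 0
              else pvCellAt (r0 :: rest) (r, c))
              (PySem.List.pyRange 0 (r0.length : Int) 1))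
            (PySem.List.pyRange 0 ((r0 :: rest).length : Int) 1) := by
      simp only [pvRange_natCast, List.map_map, Function.comp_def]
      refine (pvMatFold
        (fun rc => ¬ (List.foldl (fun s c => s.update c.pixels) PySem.Set.empty
          (pvScanA (r0 :: rest) ((r0 :: rest).length : Int) (r0.length : Int)
            (pvCells ((r0 :: rest).length : Int) (r0.length : Int)) PySem.Set.empty []
            (pvEmptyInv ((r0 :: rest).length : Int) (r0.length : Int)))).contains rc = true)
        (fun rc => pvCellAt (r0 :: rest) rc)
        ((List.range r0.length).map (fun k : Nat => (k : Int)))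
        (r0 :: rest).length _ (by simp)).trans ?_
      rw [List.drop_of_length_le (by simp), List.append_nil]
      apply List.map_congr_left
      intro k hk
      rw [List.mem_range] at hk
      have hgetz : (List.map (fun _ => List.map (fun _ => (0 : Int)) (List.range r0.length))
          (List.range (r0 :: rest).length)).getD k []
          = List.map (fun _ => (0 : Int)) (List.range r0.length) := by
        rw [List.map_const', List.getD_replicate]
        simpa using hk
      rw [hgetz]
      refine (pvRowFold _ _ r0.length _ (by simp)).trans ?_
      rw [List.drop_of_length_le (by simp), List.append_nil]
      apply List.map_congr_left
      intro c hc
      rw [List.mem_range] at hc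
      have hz : (List.map (fun _ => (0 : Int)) (List.range r0.length)).getD c 0 = 0 := by
        rw [List.map_const', List.getD_replicate]
        simpa using hc
      rw [hz, hAP]
      by_cases hcv : (pvScanB (r0 :: rest) ((r0 :: rest).length : Int) (r0.length : Int)
          (pvCells ((r0 :: rest).length : Int) (r0.length : Int)) PySem.Set.empty []
          pB pC).1.contains ((k : Int), (c : Int)) = true
      · rw [if_neg (not_not_intro hcv), if_pos hcv]
      · rw [if_pos hcv, if_neg hcv]
    rw [hbg]
    exact pvMirror_eq hF _

-- ===== VERDICT (by name: the statement is the Claim_ definition above) =====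
theorem mirror_objects_h_spec : Claim_equal_mirror_objects_h := by
  unfold Claim_equal_mirror_objects_h
  intro grid hdom hpre
  unfold Spec_mirror_objects_h
  cases grid with
  | nil => simp [mirror_objects_h, mirror_objects_h_alt, pvFindComponents]
  | cons r0 rest =>
    by_cases hr0 : r0 = []
    · subst hr0
      simp [mirror_objects_h, mirror_objects_h_alt, pvFindComponents]
    · have hfc : pvFindComponents (r0 :: rest)
          = pvScanA (r0 :: rest) ((r0 :: rest).length : Int) (r0.length : Int)
            (pvCells ((r0 :: rest).length : Int) (r0.length : Int)) PySem.Set.empty []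
            (pvEmptyInv ((r0 :: rest).length : Int) (r0.length : Int)) := by
        have h1 : pvFindComponents (r0 :: rest)
            = if r0 = [] then [] else pvScanA (r0 :: rest) ((r0 :: rest).length : Int)
              (r0.length : Int) (pvCells ((r0 :: rest).length : Int) (r0.length : Int))
              PySem.Set.empty [] (pvEmptyInv ((r0 :: rest).length : Int) (r0.length : Int)) := rfl
        rw [h1, if_neg hr0]
      simp only [mirror_objects_h, mirror_objects_h_alt, if_neg hr0, hfc]
      exact pv_core2 r0 rest hr0 hpre _ _
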